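-- pv_equiv track=rewrite | github.com/foadnamjoo/truthfulqa-audit | scripts/evaluate_subset_rank_preservation.py | pair_intersection_across_models
-- ===== SOURCE A (Python) =====
-- from collections import defaultdict
-- from typing import Any, Dict, Iterable, List, Optional, Set, Tuple
--
-- def pair_intersection_across_models(merged: Dict[Tuple[str, int], int]) -> Tuple[List[str], Set[int]]:
--     by_model: Dict[str, Set[int]] = defaultdict(set)
--     for (model, pid), _ in merged.items():
--         by_model[model].add(pid)
--     if not by_model:
--         return [], set()
--     common: Optional[Set[int]] = None
--     for s in by_model.values():
--         common = s if common is None else common & s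
--     assert common is not None
--     models = sorted(by_model.keys())
--     return models, common
-- ===== SOURCE B (Python) =====
-- from collections import Counter
--
-- def pair_intersection_across_models(merged):
--     if not merged:
--         return [], set()
--     # one pass: distinct model names and a per-pid count (keys are unique, so
--     # the count of a pid equals the number of models that contain it)
--     models = {m for (m, _pid) in merged}
--     cnt = Counter(pid for (_m, pid) in merged)
--     n = len(models)
--     # a pid common to all models occurs under the first model in particular,
--     # so it suffices to scan the first model's pairs
--     first_model = next(iter(merged))[0]
--     common = {pid for (m, pid) in merged if m == first_model and cnt[pid] == n}
--     return sorted(models), common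
-- ===== Notes on version B (the rewrite author's own statement) =====
-- stated objective: alternative
-- what changed: Replaces A's per-model pid-sets plus pairwise set-intersection loop by a single Counter over pids (whose count equals the number of models containing the pid, since (model,pid) keys are unique) together with the set of model names, then selects the common pids by one filtered scan of the first model's pairs.
import Mathlib
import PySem

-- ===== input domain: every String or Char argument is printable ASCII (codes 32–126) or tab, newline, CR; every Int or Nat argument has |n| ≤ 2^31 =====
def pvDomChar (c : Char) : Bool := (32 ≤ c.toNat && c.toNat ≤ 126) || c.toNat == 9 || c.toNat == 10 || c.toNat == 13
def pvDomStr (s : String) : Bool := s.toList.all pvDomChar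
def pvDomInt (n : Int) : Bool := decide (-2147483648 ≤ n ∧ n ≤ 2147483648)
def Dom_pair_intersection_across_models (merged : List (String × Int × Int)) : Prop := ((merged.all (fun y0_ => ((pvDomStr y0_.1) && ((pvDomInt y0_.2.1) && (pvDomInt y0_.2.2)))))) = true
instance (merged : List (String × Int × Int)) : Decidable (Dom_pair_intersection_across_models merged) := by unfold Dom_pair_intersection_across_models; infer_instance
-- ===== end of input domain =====

-- B replaces A's per-model pid-sets and the pairwise set-intersection loop by a single
-- Counter over pids (count = number of models containing the pid, since keys are unique)
-- and one filtered scan of the first model's pairs; objective: alternative decomposition.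

-- ===== PORT A =====
def pair_intersection_across_models (merged : List (String × Int × Int)) : List String × List Int :=
  -- by_model: defaultdict(set); by_model[model].add(pid)
  let by_model : PySem.Dict String (PySem.Set Int) :=
    merged.foldl (fun d e => d.insert e.1 (PySem.Set.add (d.getD e.1 PySem.Set.empty) e.2.1)) PySem.Dict.empty
  if by_model.size = 0 then ([], PySem.Set.empty)   -- if not by_model: return [], set()
  else
    -- common = s if common is None else common & s, over by_model.values()
    let common : Option (PySem.Set Int) :=
      by_model.values.foldl
        (fun c s => match c with
          | none => some s
          | some c0 => some (PySem.Set.inter c0 s)) none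
    let models := PySem.List.sorted by_model.keys (fun x => x) false
    match common with
    | some c => (models, c)
    | none => ([], PySem.Set.empty)   -- assert common is not None: unreachable (by_model nonempty)

-- ===== PORT B =====
def pair_intersection_across_models_alt (merged : List (String × Int × Int)) : List String × List Int :=
  match merged with
  | [] => ([], PySem.Set.empty)                      -- if not merged: return [], set()
  | e0 :: tl =>
    let all := e0 :: tl
    let models : PySem.Set String := PySem.Set.ofList (all.map (fun e => e.1))
    let cnt : PySem.Dict Int Int := PySem.Dict.counter (all.map (fun e => e.2.1))
    let n : Int := PySem.Set.len models
    let firstModel := e0.1                           -- next(iter(merged))[0]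
    let common : PySem.Set Int :=
      PySem.Set.ofList ((all.filter (fun e => e.1 == firstModel && cnt.getD e.2.1 0 == n)).map (fun e => e.2.1))
    (PySem.List.sorted models (fun x => x) false, common)

-- ===== PRECONDITION & SPEC =====
-- merged stands for a Python dict keyed by (model, pid): Pre_ states the association-list
-- invariant that these keys are pairwise distinct (no Python dict violates it).
def Pre_pair_intersection_across_models (merged : List (String × Int × Int)) : Prop :=
  (merged.map (fun e => (e.1, e.2.1))).Nodup
instance (merged : List (String × Int × Int)) : Decidable (Pre_pair_intersection_across_models merged) := by
  unfold Pre_pair_intersection_across_models; infer_instance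
def pvWitness_pair_intersection_across_models : (List (String × Int × Int)) :=
  [("a", 1, 5), ("a", 2, 7), ("b", 1, 6)]
def Spec_pair_intersection_across_models (merged : List (String × Int × Int)) (out : List String × List Int) : Prop := out = pair_intersection_across_models_alt merged
instance (merged : List (String × Int × Int)) (out : List String × List Int) : Decidable (Spec_pair_intersection_across_models merged out) := by unfold Spec_pair_intersection_across_models; infer_instance

-- ===== CLAIM (what is proved, stated in full; the proofs are below) =====
def Claim_equal_pair_intersection_across_models : Prop := ∀ (merged : List (String × Int × Int)), Dom_pair_intersection_across_models merged → Pre_pair_intersection_across_models merged → Spec_pair_intersection_across_models merged (pair_intersection_across_models merged)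

-- ===== LEMMAS AND PROOFS =====

-- pids listed with model m (with repetitions as they occur in the list)
def pvPids (merged : List (String × Int × Int)) (m : String) : List Int :=
  (merged.filter (fun e => e.1 == m)).map (fun e => e.2.1)

lemma pv_getD_build (l : List (String × Int × Int)) (d : PySem.Dict String (PySem.Set Int)) (m : String) :
    (l.foldl (fun d e => d.insert e.1 (PySem.Set.add (d.getD e.1 PySem.Set.empty) e.2.1)) d).getD m PySem.Set.empty
      = ((l.filter (fun e => e.1 == m)).map (fun e => e.2.1)).foldl PySem.Set.add (d.getD m PySem.Set.empty) := by
  induction l generalizing d with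
  | nil => rfl
  | cons e t ih =>
    simp only [List.foldl_cons, ih, List.filter_cons]
    by_cases h : e.1 = m
    · simp [h]
    · simp [h, PySem.Dict.getD_insert, Ne.symm h]

lemma pv_foldl_add_prefix {α : Type} [BEq α] (xs : List α) (acc : PySem.Set α) :
    ∃ t, xs.foldl PySem.Set.add acc = acc ++ t := by
  induction xs generalizing acc with
  | nil => exact ⟨[], by simp⟩
  | cons x xs ih =>
    rcases ih (PySem.Set.add acc x) with ⟨t, ht⟩
    simp only [List.foldl_cons, ht]
    simp only [PySem.Set.add, PySem.Set.contains]
    by_cases h : List.contains acc x = true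
    · exact ⟨t, by simp [h]⟩
    · exact ⟨x :: t, by simp [h]⟩

lemma pv_ofList_cons {α : Type} [BEq α] (x : α) (xs : List α) :
    ∃ t, PySem.Set.ofList (x :: xs) = x :: t := by
  rcases pv_foldl_add_prefix xs (PySem.Set.add PySem.Set.empty x) with ⟨t, ht⟩
  refine ⟨t, ?_⟩
  unfold PySem.Set.ofList
  simpa [PySem.Set.add, PySem.Set.empty] using ht

lemma pv_foldl_optinter (sets : List (PySem.Set Int)) (s : PySem.Set Int) :
    sets.foldl
        (fun c t => match c with
          | none => some t
          | some c0 => some (PySem.Set.inter c0 t)) (some s)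
      = some (sets.foldl PySem.Set.inter s) := by
  induction sets generalizing s with
  | nil => rfl
  | cons t ts ih => simp only [List.foldl_cons, ih]

lemma pv_foldl_inter_eq_filter (sets : List (PySem.Set Int)) (s : PySem.Set Int) :
    sets.foldl PySem.Set.inter s = s.filter (fun x => sets.all (fun t => PySem.Set.contains t x)) := by
  induction sets generalizing s with
  | nil => simp
  | cons t ts ih =>
    simp only [List.foldl_cons, ih, PySem.Set.inter, List.filter_filter, List.all_cons]
    apply List.filter_congr
    intro a _
    simp [Bool.and_comm]


lemma pv_foldl_add_filter {α : Type} [BEq α] [LawfulBEq α] (p : α → Bool) (xs : List α) (acc : PySem.Set α) :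
    (xs.filter p).foldl PySem.Set.add (acc.filter p) = (xs.foldl PySem.Set.add acc).filter p := by
  induction xs generalizing acc with
  | nil => rfl
  | cons x xs ih =>
    simp only [List.filter_cons, List.foldl_cons]
    by_cases hp : p x = true
    · simp only [hp, if_true, List.foldl_cons]
      rw [← ih (PySem.Set.add acc x)]
      congr 1
      simp only [PySem.Set.add, PySem.Set.contains]
      by_cases h : x ∈ acc
      · simp [h, hp]
      · simp [h, hp, List.filter_append]
    · have hfe : List.filter p (PySem.Set.add acc x) = List.filter p acc := by
        simp only [PySem.Set.add, PySem.Set.contains]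
        by_cases h : x ∈ acc
        · simp [h]
        · simp [h, List.filter_append, hp]
      simp only [hp, Bool.false_eq_true, if_false]
      rw [← ih (PySem.Set.add acc x), hfe]

lemma pv_ofList_filter {α : Type} [BEq α] [LawfulBEq α] (p : α → Bool) (xs : List α) :
    PySem.Set.ofList (xs.filter p) = (PySem.Set.ofList xs).filter p := by
  have := pv_foldl_add_filter p xs PySem.Set.empty
  simpa [PySem.Set.ofList, PySem.Set.empty] using this




lemma pv_B_shape (l : List (String × Int × Int)) (m0 : String) (q : Int → Bool) :
    PySem.Set.ofList ((l.filter (fun e => e.1 == m0 && q e.2.1)).map (fun e => e.2.1))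
      = (PySem.Set.ofList (pvPids l m0)).filter q := by
  rw [← pv_ofList_filter]
  congr 1
  unfold pvPids
  induction l with
  | nil => rfl
  | cons e t ih =>
    simp only [List.filter_cons]
    by_cases h1 : (e.1 == m0) = true
    · by_cases h2 : q e.2.1 = true
      · simp [h1, h2, ih]
      · simp [h1, h2, ih]
    · simp [h1, ih]

lemma pv_count_eq_iff (merged : List (String × Int × Int))
    (hn : (merged.map (fun e => (e.1, e.2.1))).Nodup) (x : Int) :
    ((merged.map (fun e => e.2.1)).count x = (PySem.Set.ofList (merged.map (fun e => e.1))).length)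
      ↔ ∀ m ∈ PySem.Set.ofList (merged.map (fun e => e.1)), x ∈ pvPids merged m := by
  classical
  set K : List String := PySem.Set.ofList (merged.map (fun e => e.1)) with hKdef
  set M : List String := (merged.filter (fun e => e.2.1 == x)).map (fun e => e.1) with hMdef
  have hKnodup : K.Nodup := PySem.Set.nodup_ofList _
  -- count as length of M
  have hcount : (merged.map (fun e => e.2.1)).count x = M.length := by
    simp [hMdef, List.count_eq_countP, List.countP_eq_length_filter,
      List.filter_map, Function.comp_def]
  -- M is nodup
  have hMnodup : M.Nodup := by
    have h1 : ((merged.filter (fun e => e.2.1 == x)).map (fun e => (e.1, e.2.1))).Nodup :=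
      hn.sublist (List.Sublist.map _ List.filter_sublist)
    have h2 : ∀ e ∈ merged.filter (fun e => e.2.1 == x), e.2.1 = x := by
      intro e he; exact beq_iff_eq.mp (List.mem_filter.mp he).2
    have : M = ((merged.filter (fun e => e.2.1 == x)).map (fun e => (e.1, e.2.1))).map Prod.fst := by
      simp [hMdef, List.map_map, Function.comp]
    rw [this]
    refine h1.map_on ?_
    intro a ha b hb hab
    rcases List.mem_map.mp ha with ⟨ea, hea, rfl⟩
    rcases List.mem_map.mp hb with ⟨eb, heb, rfl⟩
    simp only [Prod.mk.injEq]
    exact ⟨hab, by rw [h2 ea hea, h2 eb heb]⟩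
  -- membership in M ↔ pid listed for that model
  have hMmem : ∀ m, m ∈ M ↔ x ∈ pvPids merged m := by
    intro m
    simp only [hMdef, pvPids, List.mem_map, List.mem_filter, beq_iff_eq]
    constructor
    · rintro ⟨e, ⟨he, h2⟩, h1⟩; exact ⟨e, ⟨he, h1⟩, h2⟩
    · rintro ⟨e, ⟨he, h1⟩, h2⟩; exact ⟨e, ⟨he, h2⟩, h1⟩
  have hMK : M ⊆ K := by
    intro m hm
    rcases List.mem_map.mp (hMdef ▸ hm) with ⟨e, he, rfl⟩
    exact (PySem.Set.mem_ofList _ _).mpr (List.mem_map_of_mem (List.mem_of_mem_filter he))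
  have hcardM : M.toFinset.card = M.length := List.toFinset_card_of_nodup hMnodup
  have hcardK : K.toFinset.card = K.length := List.toFinset_card_of_nodup hKnodup
  have hsub : M.toFinset ⊆ K.toFinset := by
    intro m hm; exact List.mem_toFinset.mpr (hMK (List.mem_toFinset.mp hm))
  rw [hcount]
  constructor
  · intro hlen m hmK
    have heq : M.toFinset = K.toFinset :=
      Finset.eq_of_subset_of_card_le hsub (by omega)
    have : m ∈ M := List.mem_toFinset.mp (heq ▸ List.mem_toFinset.mpr hmK)
    exact (hMmem m).mp this
  · intro hall
    have hKM : K ⊆ M := fun m hm => (hMmem m).mpr (hall m hm)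
    have : K.toFinset ⊆ M.toFinset := by
      intro m hm; exact List.mem_toFinset.mpr (hKM (List.mem_toFinset.mp hm))
    have heq : M.toFinset = K.toFinset := Finset.Subset.antisymm hsub this
    have := congrArg Finset.card heq
    omega

-- ===== VERDICT (by name: the statement is the Claim_ definition above) =====
theorem pair_intersection_across_models_spec : Claim_equal_pair_intersection_across_models := by
  intro merged _hdom hpre
  unfold Spec_pair_intersection_across_models
  cases merged with
  | nil => rfl
  | cons e0 tl =>
    simp only [pair_intersection_across_models, pair_intersection_across_models_alt]
    -- facts about A's by_model dict
    have hkeys : ((e0 :: tl).foldl (fun d e => d.insert e.1 (PySem.Set.add (d.getD e.1 PySem.Set.empty) e.2.1)) PySem.Dict.empty).keys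
        = PySem.Set.ofList ((e0 :: tl).map (fun e => e.1)) := by
      rw [PySem.Dict.keys_foldl_insert_key (e0 :: tl) (fun e => e.1) _ PySem.Dict.empty]
      rfl
    have hnodupK : ((e0 :: tl).foldl (fun d e => d.insert e.1 (PySem.Set.add (d.getD e.1 PySem.Set.empty) e.2.1)) PySem.Dict.empty).keys.Nodup := by
      rw [hkeys]; exact PySem.Set.nodup_ofList _
    have hget : ∀ m, ((e0 :: tl).foldl (fun d e => d.insert e.1 (PySem.Set.add (d.getD e.1 PySem.Set.empty) e.2.1)) PySem.Dict.empty).getD m PySem.Set.empty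
        = PySem.Set.ofList (pvPids (e0 :: tl) m) := by
      intro m
      rw [pv_getD_build, PySem.Dict.getD_empty]
      rfl
    have hvalues : ((e0 :: tl).foldl (fun d e => d.insert e.1 (PySem.Set.add (d.getD e.1 PySem.Set.empty) e.2.1)) PySem.Dict.empty).values
        = (PySem.Set.ofList ((e0 :: tl).map (fun e => e.1))).map (fun m => PySem.Set.ofList (pvPids (e0 :: tl) m)) := by
      rw [PySem.Dict.values_eq_map_keys _ hnodupK PySem.Set.empty, hkeys]
      exact List.map_congr_left (fun m _ => hget m)
    obtain ⟨K', hK'⟩ := pv_ofList_cons e0.1 (tl.map (fun e => e.1))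
    have hKcons : PySem.Set.ofList ((e0 :: tl).map (fun e => e.1)) = e0.1 :: K' := by
      simpa using hK'
    have hsz : ¬ ((e0 :: tl).foldl (fun d e => d.insert e.1 (PySem.Set.add (d.getD e.1 PySem.Set.empty) e.2.1)) PySem.Dict.empty).size = 0 := by
      intro h
      have hlen : ((e0 :: tl).foldl (fun d e => d.insert e.1 (PySem.Set.add (d.getD e.1 PySem.Set.empty) e.2.1)) PySem.Dict.empty).keys.length = 0 := by
        simp only [PySem.Dict.keys, PySem.Dict.size] at h ⊢
        simpa using h
      rw [hkeys, hKcons] at hlen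
      simp at hlen
    rw [if_neg hsz]
    rw [hvalues, hKcons]
    simp only [List.map_cons, List.foldl_cons]
    rw [pv_foldl_optinter, pv_foldl_inter_eq_filter]
    simp only [PySem.Dict.getD_counter, PySem.Set.len, Prod.mk.injEq]
    have hkeys' := hkeys
    simp only [List.foldl_cons] at hkeys'
    refine ⟨by rw [hkeys', hKcons], ?_⟩
    rw [pv_B_shape (e0 :: tl) e0.1
      (fun v => ((List.count v (e0.2.1 :: List.map (fun e => e.2.1) tl) : Int) == ((e0.1 :: K').length : Int)))]
    apply List.filter_congr
    intro x hx
    have hxmem : x ∈ pvPids (e0 :: tl) e0.1 := (PySem.Set.mem_ofList _ _).mp hx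
    have hcrux := pv_count_eq_iff (e0 :: tl) hpre x
    simp only [List.map_cons] at hcrux
    rw [hK'] at hcrux
    rw [Bool.eq_iff_iff]
    simp only [List.all_map, List.all_eq_true, Function.comp_apply, beq_iff_eq, Nat.cast_inj,
      PySem.Set.contains, List.contains_iff_mem, PySem.Set.mem_ofList]
    constructor
    · intro hall
      exact hcrux.mpr (List.forall_mem_cons.mpr ⟨hxmem, hall⟩)
    · intro hc
      exact fun m hm => (List.forall_mem_cons.mp (hcrux.mp hc)).2 m hm
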